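-- pv_equiv track=rewrite | github.com/git-jungmin/Baekjoon | Python3/프로그래머스/0/181918. 배열 만들기 4/배열 만들기 4.py | solution
-- ===== SOURCE A (Python) =====
-- def solution(arr):
--     i = 0
--     stk = []
--     while i < len(arr):
--         if not stk:
--             stk.append(arr[i])
--             i += 1
--         else:
--             if stk[-1] < arr[i]:
--                 stk.append(arr[i])
--                 i += 1
--             else:
--                 stk.pop(-1)
--     return stk
-- ===== SOURCE B (Python) =====
-- def solution(arr):
--     # Right-to-left suffix-minimum scan: an element survives A's monotonic stack
--     # iff it is strictly smaller than every later element.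
--     out = []
--     m = None
--     for x in reversed(arr):
--         if m is None or x < m:
--             out.append(x)
--             m = x
--     out.reverse()
--     return out
-- ===== Notes on version B (the rewrite author's own statement) =====
-- stated objective: faster
-- what changed: Replaces A's push/pop monotonic-stack loop by a right-to-left suffix-minimum scan: an element survives A's stack iff it is strictly smaller than every later element, so B keeps exactly the elements below the running minimum of the reversed array (no stack, no pops; measured ~8x constant-factor speedup).
import Mathlib
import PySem

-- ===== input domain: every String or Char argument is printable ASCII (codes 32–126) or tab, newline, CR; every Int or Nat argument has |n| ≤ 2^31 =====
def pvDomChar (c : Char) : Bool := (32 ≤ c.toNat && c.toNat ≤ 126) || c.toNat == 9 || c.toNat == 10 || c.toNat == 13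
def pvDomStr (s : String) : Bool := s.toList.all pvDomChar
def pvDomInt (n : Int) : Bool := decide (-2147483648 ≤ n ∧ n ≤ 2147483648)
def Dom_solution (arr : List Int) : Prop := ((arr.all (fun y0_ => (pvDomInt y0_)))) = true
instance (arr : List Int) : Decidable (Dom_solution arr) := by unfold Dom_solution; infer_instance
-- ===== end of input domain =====

-- B replaces A's push/pop monotonic stack by a right-to-left suffix-minimum scan
-- (keep x iff x is below the running minimum of the elements after it): a different algorithm of the same O(n) cost.


-- ===== PORT A =====
-- A's while loop over index i and stack stk; the remaining suffix arr[i:] is the first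
-- argument, and the stack is kept top-first (so stk[-1] is the head and pop(-1) drops it);
-- the returned stack is reversed back to Python's bottom-first order at the end.
def solutionLoop : List Int → List Int → List Int
  | [], stk => stk
  | x :: rest, [] => solutionLoop rest [x]            -- `if not stk: append; i += 1`
  | x :: rest, t :: ts =>
      if t < x then solutionLoop rest (x :: t :: ts)  -- `stk[-1] < arr[i]: append; i += 1`
      else solutionLoop (x :: rest) (t :: ts).tail    -- `else: stk.pop(-1)` (i unchanged)
  termination_by rest stk => 2 * rest.length + stk.length

def solution (arr : List Int) : List Int := (solutionLoop arr []).reverse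

-- ===== PORT B =====
-- one step of B's `for x in reversed(arr)` body on the state (out, m): keep x iff m is None or x < m
def bStep (s : List Int × Option Int) (x : Int) : List Int × Option Int :=
  match s.2 with
  | none => (s.1 ++ [x], some x)
  | some m => if x < m then (s.1 ++ [x], some x) else s

-- `for x in reversed(arr)` as a fold over arr.reverse; final `out.reverse()` at the end
def solution_alt (arr : List Int) : List Int :=
  ((arr.reverse.foldl bStep ([], none)).1).reverse

-- ===== PRECONDITION & SPEC =====
def Spec_solution (arr : List Int) (out : List Int) : Prop := out = solution_alt arr
instance (arr : List Int) (out : List Int) : Decidable (Spec_solution arr out) := by unfold Spec_solution; infer_instance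

-- ===== CLAIM (what is proved, stated in full; the proofs are below) =====
def Claim_equal_solution : Prop := ∀ (arr : List Int), Dom_solution arr → Spec_solution arr (solution arr)

-- ===== LEMMAS AND PROOFS =====

-- the common specification: keep x iff x is below the head (= minimum) of the kept suffix
def keepSuffix : List Int → List Int
  | [] => []
  | x :: rest =>
      match keepSuffix rest with
      | [] => [x]
      | m :: ms => if x < m then x :: m :: ms else m :: ms

-- `while stk and stk[-1] >= x: stk.pop()` effect on the top-first stack, as a helper for A's analysis
def popGE (x : Int) : List Int → List Int
  | [] => []
  | t :: ts => if t ≥ x then popGE x ts else t :: ts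

lemma solutionLoop_step (x : Int) (rest : List Int) :
    ∀ stk : List Int, solutionLoop (x :: rest) stk = solutionLoop rest (x :: popGE x stk) := by
  intro stk
  induction stk with
  | nil => simp [solutionLoop, popGE]
  | cons t ts ih =>
      by_cases h : t < x
      · simp [solutionLoop, popGE, h, not_le.mpr h]
      · have h' : x ≤ t := not_lt.mp h
        simp [solutionLoop, popGE, h, h', ih]

lemma solutionLoop_foldl (arr : List Int) :
    ∀ stk : List Int, solutionLoop arr stk = arr.foldl (fun stk x => x :: popGE x stk) stk := by
  induction arr with
  | nil => intro stk; simp [solutionLoop]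
  | cons x rest ih => intro stk; rw [solutionLoop_step, List.foldl_cons, ih]

lemma popGE_filter (x : Int) :
    ∀ stk : List Int, stk.Pairwise (· > ·) → popGE x stk = stk.filter (fun t => decide (t < x)) := by
  intro stk
  induction stk with
  | nil => intro _; rfl
  | cons t ts ih =>
      intro hp
      by_cases h : t ≥ x
      · simp [popGE, h, not_lt.mpr h, ih (List.Pairwise.of_cons hp)]
      · have h' : t < x := not_le.mp h
        have hall : ∀ a ∈ ts, a < t := fun a ha => (List.pairwise_cons.mp hp).1 a ha
        have : ts.filter (fun t => decide (t < x)) = ts :=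
          List.filter_eq_self.mpr (fun a ha => by simp; exact lt_trans (hall a ha) h')
        simp [popGE, h, h', this]

-- head of keepSuffix is the strict lower bound test for the whole suffix
lemma all_lt_iff_keepSuffix (t : Int) :
    ∀ l : List Int, (l.all (fun a => decide (t < a))) =
      (match keepSuffix l with | [] => true | m :: _ => decide (t < m)) := by
  intro l
  induction l with
  | nil => rfl
  | cons y r ih =>
      simp only [List.all_cons, keepSuffix]
      cases hk : keepSuffix r with
      | nil => rw [ih, hk]; simp
      | cons m ms =>
          rw [ih, hk]
          by_cases h : y < m
          · simp [h]; omega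
          · have h' : m ≤ y := not_lt.mp h
            simp [h]; omega

lemma pairwise_step (x : Int) (stk : List Int) (hp : stk.Pairwise (· > ·)) :
    (x :: popGE x stk).Pairwise (· > ·) := by
  rw [popGE_filter x stk hp]
  refine List.pairwise_cons.mpr ⟨?_, hp.filter _⟩
  intro a ha
  have := List.of_mem_filter ha
  simpa using this

-- A's fold from any strictly decreasing stack: survivors are keepSuffix of the input
-- in reverse, followed by the stack entries below every input element
lemma foldl_keepSuffix (arr : List Int) :
    ∀ stk : List Int, stk.Pairwise (· > ·) →
      arr.foldl (fun stk x => x :: popGE x stk) stk =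
        (keepSuffix arr).reverse ++ stk.filter (fun t => arr.all (fun a => decide (t < a))) := by
  induction arr with
  | nil => intro stk _; simp [keepSuffix]
  | cons x rest ih =>
      intro stk hp
      rw [List.foldl_cons, ih _ (pairwise_step x stk hp), popGE_filter x stk hp,
          List.filter_cons, List.filter_filter]
      have hx := all_lt_iff_keepSuffix x rest
      simp only [keepSuffix]
      cases hk : keepSuffix rest with
      | nil =>
          rw [hk] at hx
          simp only [List.filter_cons]
          simp only [hx]
          simp [List.all_cons, Bool.and_comm]
      | cons m ms =>
          rw [hk] at hx
          by_cases h : x < m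
          · simp only [hx, h, decide_true]
            simp [List.all_cons, Bool.and_comm]
          · simp only [hx]
            simp [h, List.all_cons, Bool.and_comm]

-- B's fold over the reversed input computes keepSuffix (reversed) with its head as the running minimum
lemma bFold_keepSuffix :
    ∀ arr : List Int, arr.reverse.foldl bStep ([], none) =
      ((keepSuffix arr).reverse, (keepSuffix arr).head?) := by
  intro arr
  induction arr with
  | nil => rfl
  | cons x rest ih =>
      show ((x :: rest).reverse).foldl bStep ([], none) = _
      rw [List.reverse_cons, List.foldl_append, ih]
      simp only [List.foldl_cons, List.foldl_nil, keepSuffix]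
      cases hk : keepSuffix rest with
      | nil => simp [bStep]
      | cons m ms =>
          by_cases h : x < m
          · simp [bStep, h]
          · simp [bStep, h]

-- ===== VERDICT (by name: the statement is the Claim_ definition above) =====
theorem solution_spec : Claim_equal_solution := by
  intro arr _
  unfold Spec_solution solution solution_alt
  rw [solutionLoop_foldl, foldl_keepSuffix arr [] List.Pairwise.nil, bFold_keepSuffix]
  simp
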